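-- pv_equiv track=rewrite | github.com/MonashBioinformaticsPlatform/RSeQC | rseqc/qcmodule/bam_cigar.py | fetch_exon
-- ===== SOURCE A (Python) =====
-- def fetch_exon(chrom, st, cigar):
-- 	''' fetch exon regions defined by cigar. st must be zero based
-- 	return list of tuple of (chrom,st, end)
-- 	'''
-- 	#match = re.compile(r'(\d+)(\D)')
-- 	chrom_st = st
-- 	exon_bound =[]
-- 	for c,s in cigar:	#code and size
-- 		if c==0:		#match
-- 			exon_bound.append((chrom, chrom_st,chrom_st + s))
-- 			chrom_st += s
-- 		elif c==1:		#insertion to ref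
-- 			continue
-- 		elif c==2:		#deletion to ref
-- 			chrom_st += s
-- 		elif c==3:		#gap or intron
-- 			chrom_st += s
-- 		elif c==4:		#soft clipping. We do NOT include soft clip as part of exon
-- 			chrom_st += s
-- 		else:
-- 			continue
-- 	return exon_bound
-- ===== SOURCE B (Python) =====
-- def fetch_exon(chrom, st, cigar):
--     ''' fetch exon regions defined by cigar. st must be zero based
--     return list of tuple of (chrom,st, end)
--     '''
--     # pass 1: prefix-sum table of reference start positions
--     starts = [st]
--     for c, s in cigar:
--         starts.append(starts[-1] + (s if c in (0, 2, 3, 4) else 0))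
--     # pass 2: emit an exon for every match op, using its precomputed start
--     return [(chrom, p, p + s) for (c, s), p in zip(cigar, starts) if c == 0]
-- ===== Notes on version B (the rewrite author's own statement) =====
-- stated objective: alternative
-- what changed: Replaced the single interleaved accumulator loop with a two-pass decomposition: first build a prefix-sum table of reference start positions, then a separate filtered emission pass over cigar zipped with that table.
import Mathlib
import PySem

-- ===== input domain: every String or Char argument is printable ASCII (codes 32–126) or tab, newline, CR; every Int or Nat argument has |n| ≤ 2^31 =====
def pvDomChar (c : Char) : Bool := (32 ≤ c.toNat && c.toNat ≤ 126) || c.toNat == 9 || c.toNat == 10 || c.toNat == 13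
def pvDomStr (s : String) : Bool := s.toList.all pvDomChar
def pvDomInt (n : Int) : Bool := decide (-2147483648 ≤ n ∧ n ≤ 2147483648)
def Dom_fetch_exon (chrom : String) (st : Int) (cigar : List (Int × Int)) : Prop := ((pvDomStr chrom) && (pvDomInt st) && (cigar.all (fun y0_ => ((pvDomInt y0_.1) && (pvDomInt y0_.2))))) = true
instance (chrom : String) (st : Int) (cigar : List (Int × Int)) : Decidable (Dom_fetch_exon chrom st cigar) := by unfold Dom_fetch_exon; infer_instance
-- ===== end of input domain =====

-- B replaces A's interleaved accumulator loop by a prefix-sum table of start positions plus a separate filtered emission pass (alternative decomposition, same cost).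


-- ===== PORT A =====
-- A's loop: one fold carrying (chrom_st, exon_bound), branches in A's order.
def fetch_exon (chrom : String) (st : Int) (cigar : List (Int × Int)) : List (String × Int × Int) :=
  (cigar.foldl (fun (state : Int × List (String × Int × Int)) cs =>
      let chrom_st := state.1
      let acc := state.2
      let c := cs.1
      let s := cs.2
      if c = 0 then (chrom_st + s, acc ++ [(chrom, chrom_st, chrom_st + s)])
      else if c = 1 then (chrom_st, acc)
      else if c = 2 then (chrom_st + s, acc)
      else if c = 3 then (chrom_st + s, acc)
      else if c = 4 then (chrom_st + s, acc)
      else (chrom_st, acc)) (st, [])).2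

-- ===== PORT B =====
-- pass 1 of Source B: starts[-1] is the running last element, each step appends it plus the advance.
def pvStarts (st : Int) : List (Int × Int) → List Int
  | [] => [st]
  | (c, s) :: rest => st :: pvStarts (st + (if c = 0 ∨ c = 2 ∨ c = 3 ∨ c = 4 then s else 0)) rest

def fetch_exon_alt (chrom : String) (st : Int) (cigar : List (Int × Int)) : List (String × Int × Int) :=
  let starts := pvStarts st cigar
  ((cigar.zip starts).filter (fun p => p.1.1 = 0)).map (fun p => (chrom, p.2, p.2 + p.1.2))

-- ===== PRECONDITION & SPEC =====
def Spec_fetch_exon (chrom : String) (st : Int) (cigar : List (Int × Int)) (out : List (String × Int × Int)) : Prop := out = fetch_exon_alt chrom st cigar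
instance (chrom : String) (st : Int) (cigar : List (Int × Int)) (out : List (String × Int × Int)) : Decidable (Spec_fetch_exon chrom st cigar out) := by unfold Spec_fetch_exon; infer_instance

-- ===== CLAIM (what is proved, stated in full; the proofs are below) =====
def Claim_equal_fetch_exon : Prop := ∀ (chrom : String) (st : Int) (cigar : List (Int × Int)), Dom_fetch_exon chrom st cigar → Spec_fetch_exon chrom st cigar (fetch_exon chrom st cigar)

-- ===== LEMMAS AND PROOFS =====

-- B peels one cigar op: emit for a match, then continue from the advanced position.
theorem fetch_exon_alt_cons (chrom : String) (st c s : Int) (rest : List (Int × Int)) :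
    fetch_exon_alt chrom st ((c, s) :: rest) =
      (if c = 0 then [(chrom, st, st + s)] else []) ++
        fetch_exon_alt chrom (st + (if c = 0 ∨ c = 2 ∨ c = 3 ∨ c = 4 then s else 0)) rest := by
  by_cases h : c = 0 <;>
    simp [fetch_exon_alt, pvStarts, h]

-- A's fold from any (st, acc) equals acc ++ B's result from st.
theorem fetch_exon_loop_eq (chrom : String) (cigar : List (Int × Int)) :
    ∀ (st : Int) (acc : List (String × Int × Int)),
      (cigar.foldl (fun (state : Int × List (String × Int × Int)) cs =>
        let chrom_st := state.1
        let acc := state.2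
        let c := cs.1
        let s := cs.2
        if c = 0 then (chrom_st + s, acc ++ [(chrom, chrom_st, chrom_st + s)])
        else if c = 1 then (chrom_st, acc)
        else if c = 2 then (chrom_st + s, acc)
        else if c = 3 then (chrom_st + s, acc)
        else if c = 4 then (chrom_st + s, acc)
        else (chrom_st, acc)) (st, acc)).2 = acc ++ fetch_exon_alt chrom st cigar := by
  induction cigar with
  | nil => intro st acc; simp [fetch_exon_alt, pvStarts]
  | cons hd tl ih =>
    intro st acc
    obtain ⟨c, s⟩ := hd
    rw [List.foldl_cons, fetch_exon_alt_cons]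
    by_cases h0 : c = 0
    · simp only [h0, ih]
      simp [List.append_assoc]
    · by_cases h1 : c = 1
      · simp [h1, ih]
      · by_cases h2 : c = 2
        · simp [h2, ih]
        · by_cases h3 : c = 3
          · simp [h3, ih]
          · by_cases h4 : c = 4
            · simp [h0, h1, h2, h3, h4, ih]
            · simp [h0, h1, h2, h3, h4, ih]

-- ===== VERDICT (by name: the statement is the Claim_ definition above) =====
theorem fetch_exon_spec : Claim_equal_fetch_exon := by
  intro chrom st cigar _
  unfold Spec_fetch_exon fetch_exon
  simpa using fetch_exon_loop_eq chrom cigar st []
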